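-- pv_equiv track=rewrite | github.com/chu-dw/python_algorithm | ch11_exercise.py | count_duplication
-- ===== SOURCE A (Python) =====
-- def count_duplication(input: dict) -> int:  #list로 만들어서 반복문 count로 비교도 가능
--     output = 0
--     set_store = set()
--     for index in input:
--         intial = len(set_store)
--         set_store.add(input[index])
--         check = len(set_store)
--         if intial == check:
--             output=output+1
--
--     return output
-- ===== SOURCE B (Python) =====
-- def count_duplication(input: dict) -> int:
--     vs = sorted(input.values())
--     return sum(1 for x, y in zip(vs, vs[1:]) if x == y)
-- ===== Notes on version B (the rewrite author's own statement) =====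
-- stated objective: alternative
-- what changed: Replaces A's one-pass set-growth counter by sort-then-scan: sort the values and count adjacent equal pairs (each group of k equal values contributes k-1 pairs, i.e. its duplicates).
import Mathlib
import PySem

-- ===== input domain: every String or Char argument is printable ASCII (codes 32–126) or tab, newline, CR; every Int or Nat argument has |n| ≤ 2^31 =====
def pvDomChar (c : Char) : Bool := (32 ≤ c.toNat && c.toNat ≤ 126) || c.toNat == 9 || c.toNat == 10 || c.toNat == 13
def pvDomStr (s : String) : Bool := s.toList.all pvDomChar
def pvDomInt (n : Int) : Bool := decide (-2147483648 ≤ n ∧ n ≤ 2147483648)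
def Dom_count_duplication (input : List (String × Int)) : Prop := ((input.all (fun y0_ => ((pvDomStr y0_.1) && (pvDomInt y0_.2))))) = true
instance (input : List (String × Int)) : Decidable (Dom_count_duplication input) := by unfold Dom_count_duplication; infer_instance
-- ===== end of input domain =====

-- B replaces A's one-pass set-growth counter by sort-then-scan: sort the values and count
-- adjacent equal pairs (an alternative algorithm of similar cost; not claimed faster).


-- ===== PORT A =====
-- Literal port: the dict is the association list; 'for index in input' walks the keys and
-- 'input[index]' is the dict lookup (under Pre_ the key is always present, so getD's default is never used).
def count_duplication (input : List (String × Int)) : Int :=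
  let d : PySem.Dict String Int := PySem.Dict.mk input
  (d.keys.foldl
    (fun (st : Int × PySem.Set Int) index =>
      let intial := PySem.Set.len st.2
      let set_store := PySem.Set.add st.2 (d.getD index 0)
      let check := PySem.Set.len set_store
      (if intial = check then st.1 + 1 else st.1, set_store))
    ((0 : Int), (PySem.Set.empty : PySem.Set Int))).1

-- ===== PORT B =====
-- vs = sorted(input.values()); sum(1 for x, y in zip(vs, vs[1:]) if x == y)
def count_duplication_alt (input : List (String × Int)) : Int :=
  let vs := PySem.List.sorted (input.map Prod.snd) (fun x => x) false
  (vs.zip (PySem.List.slice vs (some 1) none)).foldl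
    (fun acc xy => if xy.1 = xy.2 then acc + 1 else acc) 0

-- ===== PRECONDITION & SPEC =====
-- Pre_ excludes association lists with duplicate keys: such a list does not represent any Python
-- dict (dict construction collapses duplicates), so the list-level behaviour there is accidental.
def Pre_count_duplication (input : List (String × Int)) : Prop :=
  (input.map Prod.fst).Nodup
instance (input : List (String × Int)) : Decidable (Pre_count_duplication input) := by
  unfold Pre_count_duplication; infer_instance

def pvWitness_count_duplication : (List (String × Int)) := [("a", 1), ("b", 1), ("c", 2)]

def Spec_count_duplication (input : List (String × Int)) (out : Int) : Prop := out = count_duplication_alt input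
instance (input : List (String × Int)) (out : Int) : Decidable (Spec_count_duplication input out) := by unfold Spec_count_duplication; infer_instance

-- ===== CLAIM (what is proved, stated in full; the proofs are below) =====
def Claim_equal_count_duplication : Prop := ∀ (input : List (String × Int)), Dom_count_duplication input → Pre_count_duplication input → Spec_count_duplication input (count_duplication input)

-- ===== LEMMAS AND PROOFS =====

-- number of adjacent equal pairs, as a structural recursion (proof-side view of B's zip fold)
def pvAdjCount : List Int → Int
  | [] => 0
  | [_] => 0
  | a :: b :: t => (if a = b then 1 else 0) + pvAdjCount (b :: t)

theorem pv_zipfold (l : List Int) : ∀ (c : Int),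
    ((l.zip l.tail).foldl (fun acc (xy : Int × Int) => if xy.1 = xy.2 then acc + 1 else acc) c)
      = c + pvAdjCount l := by
  induction l with
  | nil => intro c; simp [pvAdjCount]
  | cons a t ih =>
    intro c
    cases t with
    | nil => simp [pvAdjCount]
    | cons b t' =>
      have := ih (if a = b then c + 1 else c)
      simp only [List.tail_cons, List.zip_cons_cons, List.foldl_cons] at this ⊢
      rw [this, pvAdjCount]
      split_ifs <;> ring

-- on a nondecreasing list, adjacent equal pairs count = length - number of distinct elements
theorem pv_sorted_adj : ∀ (l : List Int), l.Pairwise (· ≤ ·) →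
    pvAdjCount l = (l.length : Int) - (l.toFinset.card : Int) := by
  intro l
  induction l with
  | nil => intro _; simp [pvAdjCount]
  | cons a t ih =>
    intro h
    cases t with
    | nil => simp [pvAdjCount]
    | cons b t' =>
      have hab : a ≤ b := (List.pairwise_cons.1 h).1 b (by simp)
      have hrest : (b :: t').Pairwise (· ≤ ·) := (List.pairwise_cons.1 h).2
      have hih := ih hrest
      by_cases hEq : a = b
      · have hmem : a ∈ (b :: t') := by simp [hEq]
        have hfin : (a :: b :: t').toFinset = (b :: t').toFinset := by
          simp only [List.toFinset_cons]
          exact Finset.insert_eq_self.2 (by simp [hEq])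
        rw [pvAdjCount, if_pos hEq, hih, hfin]
        simp only [List.length_cons]
        push_cast; ring
      · have hnmem : a ∉ (b :: t') := by
          intro hm
          rcases List.mem_cons.1 hm with h1 | h2
          · exact hEq h1
          · have hb : b ≤ a := le_trans ((List.pairwise_cons.1 hrest).1 a h2) le_rfl
            exact hEq (le_antisymm hab hb)
        have hfin : (a :: b :: t').toFinset.card = (b :: t').toFinset.card + 1 := by
          simp only [List.toFinset_cons]
          exact Finset.card_insert_of_notMem (fun hc => hnmem (by simpa using hc))
        rw [pvAdjCount, if_neg hEq, hih, hfin]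
        simp only [List.length_cons]
        push_cast; ring

-- A's loop invariant: the counter equals (#processed) - (growth of the set)
theorem pv_loop (l : List Int) : ∀ (c : Int) (s : PySem.Set Int),
    (l.foldl
      (fun (st : Int × PySem.Set Int) v =>
        (if PySem.Set.len st.2 = PySem.Set.len (PySem.Set.add st.2 v) then st.1 + 1 else st.1,
         PySem.Set.add st.2 v))
      (c, s)).1
    = c + (l.length : Int) - PySem.Set.len (PySem.Set.update s l) + PySem.Set.len s := by
  induction l with
  | nil => intro c s; simp [PySem.Set.update]
  | cons v l ih =>
    intro c s
    rw [List.foldl_cons]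
    by_cases h : s.contains v = true
    · have hmem : v ∈ s := by simpa [PySem.Set.contains] using h
      have hadd : PySem.Set.add s v = s := by simp [PySem.Set.add, PySem.Set.contains, hmem]
      have hc : ((if PySem.Set.len s = PySem.Set.len (PySem.Set.add s v) then c + 1 else c,
          PySem.Set.add s v) : Int × PySem.Set Int) = (c + 1, s) := by
        rw [hadd]; simp
      rw [hc, ih]
      have hup : PySem.Set.update s (v :: l) = PySem.Set.update s l := by
        simp [PySem.Set.update, hadd]
      rw [hup]
      simp only [List.length_cons]
      push_cast
      ring
    · have hlen : PySem.Set.len (PySem.Set.add s v) = PySem.Set.len s + 1 := by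
        simp only [PySem.Set.add, PySem.Set.len, h]
        simp
      have hc : ((if PySem.Set.len s = PySem.Set.len (PySem.Set.add s v) then c + 1 else c,
          PySem.Set.add s v) : Int × PySem.Set Int) = (c, PySem.Set.add s v) := by
        rw [hlen, if_neg (by omega)]
      rw [hc, ih]
      have hup : PySem.Set.update s (v :: l) = PySem.Set.update (PySem.Set.add s v) l := by
        simp [PySem.Set.update]
      rw [hup, hlen]
      simp only [List.length_cons]
      push_cast
      ring

-- a Python set of a list has as many elements as the list's Finset of elements
theorem pv_ofList_card (l : List Int) :
    PySem.Set.len (PySem.Set.ofList l) = (l.toFinset.card : Int) := by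
  have hnd := PySem.Set.nodup_ofList (xs := l)
  have hfin : (PySem.Set.ofList l).toFinset = l.toFinset := by
    apply Finset.ext
    intro x
    simp [PySem.Set.mem_ofList]
  have := List.toFinset_card_of_nodup hnd
  rw [hfin] at this
  simp [PySem.Set.len, ← this]

-- ===== VERDICT (by name: the statement is the Claim_ definition above) =====
theorem count_duplication_spec : Claim_equal_count_duplication := by
  intro input _ hpre
  unfold Spec_count_duplication count_duplication count_duplication_alt
  have hnd : (PySem.Dict.mk input).keys.Nodup := by
    simpa [PySem.Dict.keys_mk] using hpre
  have hv := PySem.Dict.values_eq_map_keys (PySem.Dict.mk input) hnd 0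
  -- A side: rewrite the fold over keys (with lookups) as a fold over the values list
  have hfold :
      ((PySem.Dict.mk input).keys.foldl
        (fun (st : Int × PySem.Set Int) index =>
          (if PySem.Set.len st.2 = PySem.Set.len (PySem.Set.add st.2 ((PySem.Dict.mk input).getD index 0))
           then st.1 + 1 else st.1,
           PySem.Set.add st.2 ((PySem.Dict.mk input).getD index 0)))
        ((0 : Int), (PySem.Set.empty : PySem.Set Int)))
      = ((input.map Prod.snd).foldl
        (fun (st : Int × PySem.Set Int) v =>
          (if PySem.Set.len st.2 = PySem.Set.len (PySem.Set.add st.2 v) then st.1 + 1 else st.1,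
           PySem.Set.add st.2 v))
        ((0 : Int), (PySem.Set.empty : PySem.Set Int))) := by
    have : input.map Prod.snd = (PySem.Dict.mk input).values := by
      simp [PySem.Dict.values_mk]
    rw [this, hv, List.foldl_map]
  simp only []
  rw [hfold, pv_loop]
  have hup : PySem.Set.update (PySem.Set.empty : PySem.Set Int) (input.map Prod.snd)
      = PySem.Set.ofList (input.map Prod.snd) := by
    simp [PySem.Set.update, PySem.Set.ofList, PySem.Set.empty]
  rw [hup, pv_ofList_card]
  -- B side
  set vals := input.map Prod.snd with hvals
  set vs := PySem.List.sorted vals (fun x => x) false with hvs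
  have htail : PySem.List.slice vs (some 1) none = vs.tail := PySem.List.slice_from_one vs
  rw [htail, pv_zipfold vs 0]
  have hpw : vs.Pairwise (· ≤ ·) := by
    simpa using PySem.List.sorted_pairwise (xs := vals) (key := fun x => x)
  have hperm : vs.Perm vals := PySem.List.sorted_perm vals (fun x => x) false
  have hfineq : vs.toFinset = vals.toFinset := by
    ext x; simp [hperm.mem_iff]
  rw [pv_sorted_adj vs hpw, hfineq, hperm.length_eq]
  simp [PySem.Set.len, PySem.Set.empty]
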